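-- pv_equiv track=rewrite | github.com/queelius/computational-explorations | src/oeis_attacks.py | compute_A003015
-- ===== SOURCE A (Python) =====
-- import math
-- from collections import defaultdict, Counter
-- from typing import List, Tuple, Dict, Set, Optional
--
-- def binom(n: int, k: int) -> int:
--     """Binomial coefficient C(n, k)."""
--     if k < 0 or k > n:
--         return 0
--     return math.comb(n, k)
--
-- def compute_A003015(limit: int) -> List[int]:
--     """
--     Numbers that appear >= 5 times in Pascal's triangle (up to checking
--     rows up to some bound).
--
--     Known values: 1, 120, 210, 1540, 3003, 7140, 11628, 24310, ...
--     """
--     # We need to check much further than `limit` in row numbers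
--     # because a number N might appear as C(n,k) for very large n
--     # Strategy: build map of C(n,k) for moderate n, count multiplicities
--
--     max_row = max(limit, 1000)
--     counts = defaultdict(int)
--
--     for n in range(0, max_row + 1):
--         for k in range(0, n // 2 + 1):
--             val = binom(n, k)
--             if val > limit:
--                 break
--             if k == 0 or 2 * k == n:
--                 counts[val] += 1
--             else:
--                 counts[val] += 2
--
--     return sorted(v for v, c in counts.items() if c >= 5 and v > 0)
-- ===== SOURCE B (Python) =====
-- import math
-- from collections import Counter
-- from typing import List
--
-- def compute_A003015(limit: int) -> List[int]:
--     # Enumerate only the k>=2 half-triangle representations (there are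
--     # O(sqrt(limit)) of them); every other appearance of a value v<=limit is
--     # accounted for analytically: 1 appears in every row (>=1001 times), and
--     # each v>=2 appears via C(v,1) (count 2, or 1 for the central C(2,1)=2),
--     # never enough on its own to reach 5 occurrences.
--     if limit < 1:
--         return []
--     inner = Counter()
--     k = 2
--     while math.comb(2 * k, k) <= limit:
--         n = 2 * k
--         while math.comb(n, k) <= limit:
--             inner[math.comb(n, k)] += 1 if n == 2 * k else 2
--             n += 1
--         k += 1
--     return sorted([1] + [v for v, c in inner.items() if c >= 3])
-- ===== Notes on version B (the rewrite author's own statement) =====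
-- stated objective: faster
-- what changed: Instead of scanning all max(limit,1000)+1 Pascal rows and tallying every entry <= limit, B enumerates only the k>=2 half-triangle representations C(n,k) <= limit (two nested while loops bounded by C(n,2) ~ n^2/2 and C(2k,k) >= 2^k) and accounts for the k=0 and k=1 appearances analytically: 1 always qualifies, and any other value gains exactly 2 more occurrences, so v qualifies iff its k>=2 weight is >= 3.
import Mathlib
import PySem

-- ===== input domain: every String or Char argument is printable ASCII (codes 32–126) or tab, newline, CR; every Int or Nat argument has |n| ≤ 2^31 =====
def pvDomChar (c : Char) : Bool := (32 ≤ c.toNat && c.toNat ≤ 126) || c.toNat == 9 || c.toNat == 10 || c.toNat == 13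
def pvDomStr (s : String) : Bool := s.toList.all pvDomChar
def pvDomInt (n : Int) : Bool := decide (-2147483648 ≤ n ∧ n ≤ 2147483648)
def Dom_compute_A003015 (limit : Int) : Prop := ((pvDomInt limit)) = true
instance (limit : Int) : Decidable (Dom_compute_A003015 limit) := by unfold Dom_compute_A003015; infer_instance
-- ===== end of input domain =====

-- B replaces A's scan of all max(limit,1000)+1 Pascal rows by enumerating only the
-- representations C(n,k) ≤ limit with k ≥ 2 and adding the analytic k=0/k=1
-- contributions (1 is always in the answer; every other value gains at most 2).

-- ===== PORT A =====
-- math.comb n k (used by both Pythons), via Mathlib's descFactorial formula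
-- (equal to Nat.choose, see comb_eq_choose below)
def comb (n k : Nat) : Nat := n.descFactorial k / k.factorial

def binom (n k : Int) : Int :=
  if k < 0 ∨ n < k then 0 else ((comb n.toNat k.toNat : Nat) : Int)

def aInner (limit n : Int) : List Int → PySem.Dict Int Int → PySem.Dict Int Int
  | [], counts => counts
  | k :: ks, counts =>
    let val := binom n k
    if limit < val then counts
    else if k = 0 ∨ 2 * k = n then
      aInner limit n ks (counts.insert val (counts.getD val 0 + 1))
    else
      aInner limit n ks (counts.insert val (counts.getD val 0 + 2))

def compute_A003015 (limit : Int) : List Int :=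
  let max_row := max limit 1000
  let counts :=
    (PySem.List.pyRange 0 (max_row + 1)).foldl
      (fun counts n => aInner limit n (PySem.List.pyRange 0 (PySem.Int.floordiv n 2 + 1)) counts)
      PySem.Dict.empty
  PySem.List.sorted
    ((counts.items.filter (fun p => decide (5 ≤ p.2 ∧ 0 < p.1))).map Prod.fst)
    (fun v => v)

-- ===== PORT B =====
-- the two 'while comb(...) <= limit' loops, as structural recursion on a fuel that
-- provably suffices (n ≤ C(n,k) ≤ limit while the inner loop runs, k ≤ C(2k,k) ≤ limit
-- while the outer one runs; see pvLeChoose below)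
def altInner (limit : Int) (k : Nat) : Nat → Nat → PySem.Dict Int Int → PySem.Dict Int Int
  | 0, _, inner => inner
  | fuel + 1, n, inner =>
    if ((comb n k : Nat) : Int) ≤ limit then
      altInner limit k fuel (n + 1)
        (inner.modify (comb n k : Int) 0 (· + (if n = 2 * k then 1 else 2)))
    else inner

def altOuter (limit : Int) : Nat → Nat → PySem.Dict Int Int → PySem.Dict Int Int
  | 0, _, inner => inner
  | fuel + 1, k, inner =>
    if ((comb (2 * k) k : Nat) : Int) ≤ limit then
      altOuter limit fuel (k + 1)
        (altInner limit k (limit + 1 - (2 * k : Int)).toNat (2 * k) inner)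
    else inner

def compute_A003015_alt (limit : Int) : List Int :=
  if limit < 1 then []
  else
    let inner := altOuter limit (limit - 1).toNat 2 PySem.Dict.empty
    PySem.List.sorted
      (1 :: (inner.items.filter (fun p => decide ((3 : Int) ≤ p.2))).map Prod.fst)
      (fun v => v)

-- ===== PRECONDITION & SPEC =====
def Spec_compute_A003015 (limit : Int) (out : List Int) : Prop := out = compute_A003015_alt limit
instance (limit : Int) (out : List Int) : Decidable (Spec_compute_A003015 limit out) := by unfold Spec_compute_A003015; infer_instance

-- ===== CLAIM (what is proved, stated in full; the proofs are below) =====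
def Claim_equal_compute_A003015 : Prop := ∀ (limit : Int), Dom_compute_A003015 limit → Spec_compute_A003015 limit (compute_A003015 limit)

-- ===== LEMMAS AND PROOFS =====

def vOf (q : Nat × Nat) : Int := (q.1.choose q.2 : Int)
def wgtA (q : Nat × Nat) : Int := if q.2 = 0 ∨ 2 * q.2 = q.1 then 1 else 2
def wgtB (q : Nat × Nat) : Int := if q.1 = 2 * q.2 then 1 else 2

def idxA (L : Int) : List (Nat × Nat) :=
  (List.range ((max L 1000).toNat + 1)).flatMap
    (fun m => ((List.range (m / 2 + 1)).filter (fun k => decide (vOf (m, k) ≤ L))).map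
      (fun k => (m, k)))

def idxB (L : Int) : List (Nat × Nat) :=
  ((List.range' 2 (L - 1).toNat).filter (fun j => decide (vOf (2 * j, j) ≤ L))).flatMap
    (fun j => ((List.range' (2 * j) (L + 1 - (2 * j : Int)).toNat).filter
        (fun n => decide (vOf (n, j) ≤ L))).map (fun n => (n, j)))

def WS (l : List (Nat × Nat)) (w : Nat × Nat → Int) (v : Int) : Int :=
  (l.map (fun q => if vOf q = v then w q else 0)).sum

theorem WS_nonneg {l : List (Nat × Nat)} {w : Nat × Nat → Int} (hw : ∀ q, 0 ≤ w q) (v : Int) :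
    0 ≤ WS l w v := by
  apply List.sum_nonneg
  intro x hx
  obtain ⟨q, _, rfl⟩ := List.mem_map.1 hx
  by_cases hv : vOf q = v <;> simp [hv, hw q]

theorem comb_eq_choose (n k : Nat) : comb n k = n.choose k :=
  (Nat.choose_eq_descFactorial_div_factorial n k).symm

theorem binom_natCast (m k : Nat) : binom (m : Int) (k : Int) = (m.choose k : Int) := by
  unfold binom
  rcases lt_or_ge m k with h | h
  · rw [if_pos (Or.inr (by exact_mod_cast h)), Nat.choose_eq_zero_of_lt h]; rfl
  · rw [if_neg (by omega)]
    simp [comb_eq_choose]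

theorem pvChooseMonoK (n k j : Nat) (hkj : k ≤ j) (hj : j ≤ n / 2) : n.choose k ≤ n.choose j := by
  induction j, hkj using Nat.le_induction with
  | base => exact le_rfl
  | succ m hkm ih =>
      exact le_trans (ih (by omega)) (Nat.choose_le_succ_of_lt_half_left (by omega))

theorem pvLeChoose (n k : Nat) (hk : 2 ≤ k) (hn : 2 * k ≤ n) : n ≤ n.choose k := by
  have h2 : n ≤ n.choose 2 := by
    rw [Nat.choose_two_right]
    exact (Nat.le_div_iff_mul_le (by norm_num)).2 (Nat.mul_le_mul_left n (by omega))
  exact h2.trans (pvChooseMonoK n 2 k hk (by omega))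

theorem pvSixLeChoose (n k : Nat) (hk : 2 ≤ k) (hn : 2 * k ≤ n) : 6 ≤ n.choose k := by
  calc (6:Nat) = Nat.choose 4 2 := by decide
    _ ≤ n.choose 2 := Nat.choose_le_choose 2 (by omega)
    _ ≤ n.choose k := pvChooseMonoK n 2 k hk (by omega)

theorem aInner_spec (L : Int) (m : Nat) :
    ∀ (c a : Nat), a + c = m / 2 + 1 → ∀ counts,
      aInner L (m : Int) (PySem.List.pyRange (a : Int) ((a + c : Nat) : Int)) counts
        = (((List.range' a c).filter (fun k => decide (vOf (m, k) ≤ L))).map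
            (fun k => (vOf (m, k), wgtA (m, k)))).foldl
            (fun d p => d.insert p.1 (d.getD p.1 0 + p.2)) counts := by
  intro c
  induction c with
  | zero =>
      intro a _ counts
      rw [PySem.List.pyRange_one_eq_nil (by simp)]
      simp [aInner]
  | succ c ih =>
      intro a h counts
      rw [PySem.List.pyRange_one_cons (by exact_mod_cast Nat.lt_add_of_pos_right c.succ_pos),
        List.range'_succ]
      show aInner L (m : Int) ((a : Int) :: _) counts = _
      simp only [aInner, binom_natCast]
      by_cases hbr : (m.choose a : Int) ≤ L
      · rw [if_neg (by omega)]
        have hfk : (decide (vOf (m, a) ≤ L)) = true := by simp [vOf, hbr]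
        rw [List.filter_cons, if_pos hfk, List.map_cons, List.foldl_cons]
        have hcast : (((a : Int) = 0 ∨ 2 * (a : Int) = (m : Int))) ↔ (a = 0 ∨ 2 * a = m) := by
          omega
        have harg : ((a : Int) + 1) = ((a + 1 : Nat) : Int) := by push_cast; ring
        have harg2 : ((a + (c + 1) : Nat) : Int) = (((a + 1) + c : Nat) : Int) := by
          push_cast; ring
        by_cases hw : a = 0 ∨ 2 * a = m
        · rw [if_pos (hcast.mpr hw), harg, harg2, ih (a + 1) (by omega)]
          have : wgtA (m, a) = 1 := by simp [wgtA, hw]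
          rw [this]; rfl
        · rw [if_neg (fun hh => hw (hcast.mp hh)), harg, harg2, ih (a + 1) (by omega)]
          have : wgtA (m, a) = 2 := by simp [wgtA, hw]
          rw [this]; rfl
      · rw [if_pos (by omega)]
        have hfk : (decide (vOf (m, a) ≤ L)) = false := by simp [vOf]; omega
        rw [List.filter_cons, if_neg (by simp [hfk])]
        have : (List.range' (a + 1) c).filter (fun k => decide (vOf (m, k) ≤ L)) = [] := by
          apply List.filter_eq_nil_iff.mpr
          intro k hk
          rw [List.mem_range'_1] at hk
          have hmono : m.choose a ≤ m.choose k :=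
            pvChooseMonoK m a k (by omega) (by omega)
          simp [vOf]
          omega
        rw [this]
        rfl

theorem countsA_eq (L : Int) :
    (PySem.List.pyRange 0 (max L 1000 + 1)).foldl
        (fun counts n => aInner L n (PySem.List.pyRange 0 (PySem.Int.floordiv n 2 + 1)) counts)
        PySem.Dict.empty
      = ((idxA L).map (fun q => (vOf q, wgtA q))).foldl
          (fun d p => d.insert p.1 (d.getD p.1 0 + p.2)) PySem.Dict.empty := by
  have hM0 : (0:Int) ≤ max L 1000 := le_trans (by norm_num) (le_max_right L 1000)
  have hM : max L 1000 + 1 = (((max L 1000).toNat + 1 : Nat) : Int) := by omega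
  rw [hM, PySem.List.pyRange_zero_nat, List.foldl_map]
  unfold idxA
  rw [List.map_flatMap, List.foldl_flatMap]
  apply PySem.List.foldl_congr_mem
  intro counts m _
  have hfd : PySem.Int.floordiv (m : Int) 2 + 1 = ((0 + (m / 2 + 1) : Nat) : Int) := by
    rw [show ((2:Int)) = ((2:Nat):Int) from rfl, PySem.Int.floordiv_natCast]; push_cast; ring
  have h0 : (0:Int) = ((0:Nat):Int) := rfl
  rw [hfd, h0, aInner_spec L m (m / 2 + 1) 0 (by omega), List.map_map]
  rw [List.range_eq_range']
  rfl

theorem altInner_spec (L : Int) (k : Nat) :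
    ∀ (c n : Nat) (inner : PySem.Dict Int Int),
      altInner L k c n inner
        = (((List.range' n c).filter (fun m => decide (vOf (m, k) ≤ L))).map
            (fun m => (vOf (m, k), wgtB (m, k)))).foldl
            (fun d p => d.modify p.1 0 (· + p.2)) inner := by
  intro c
  induction c with
  | zero => intro n inner; rfl
  | succ c ih =>
      intro n inner
      rw [List.range'_succ]
      show (if ((comb n k : Nat) : Int) ≤ L then _ else inner) = _
      rw [comb_eq_choose]
      by_cases hbr : ((n.choose k : Nat) : Int) ≤ L
      · have hdec : decide (vOf (n, k) ≤ L) = true := decide_eq_true hbr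
        rw [if_pos hbr]
        simp only [List.filter_cons]
        rw [if_pos hdec, List.map_cons, List.foldl_cons, ih]
        rfl
      · have hdec : decide (vOf (n, k) ≤ L) = false := decide_eq_false hbr
        rw [if_neg hbr]
        simp only [List.filter_cons]
        rw [if_neg (by rw [hdec]; exact Bool.false_ne_true)]
        have : (List.range' (n + 1) c).filter (fun m => decide (vOf (m, k) ≤ L)) = [] := by
          apply List.filter_eq_nil_iff.mpr
          intro m hm
          rw [List.mem_range'_1] at hm
          have := Nat.choose_le_choose k (show n ≤ m by omega)
          simp [vOf]
          omega
        rw [this]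
        rfl

theorem altOuter_spec (L : Int) :
    ∀ (c k : Nat) (inner : PySem.Dict Int Int),
      altOuter L c k inner
        = ((List.range' k c).filter (fun j => decide (vOf (2 * j, j) ≤ L))).foldl
            (fun inner j => altInner L j (L + 1 - (2 * j : Int)).toNat (2 * j) inner) inner := by
  intro c
  induction c with
  | zero => intro k inner; rfl
  | succ c ih =>
      intro k inner
      rw [List.range'_succ]
      show (if ((comb (2 * k) k : Nat) : Int) ≤ L then _ else inner) = _
      rw [comb_eq_choose]
      by_cases hbr : (((2 * k).choose k : Nat) : Int) ≤ L
      · have hdec : decide (vOf (2 * k, k) ≤ L) = true := decide_eq_true hbr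
        rw [if_pos hbr]
        simp only [List.filter_cons]
        rw [if_pos hdec, List.foldl_cons, ih]
      · have hdec : decide (vOf (2 * k, k) ≤ L) = false := decide_eq_false hbr
        rw [if_neg hbr]
        simp only [List.filter_cons]
        rw [if_neg (by rw [hdec]; exact Bool.false_ne_true)]
        have : (List.range' (k + 1) c).filter (fun j => decide (vOf (2 * j, j) ≤ L)) = [] := by
          apply List.filter_eq_nil_iff.mpr
          intro j hj
          rw [List.mem_range'_1] at hj
          have h1 : (2 * k).choose k ≤ (2 * j).choose k := Nat.choose_le_choose k (by omega)
          have h2 : (2 * j).choose k ≤ (2 * j).choose j := pvChooseMonoK (2 * j) k j (by omega) (by omega)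
          simp [vOf]
          omega
        rw [this]
        rfl

theorem innerB_eq (L : Int) :
    altOuter L (L - 1).toNat 2 PySem.Dict.empty
      = ((idxB L).map (fun q => (vOf q, wgtB q))).foldl
          (fun d p => d.modify p.1 0 (· + p.2)) PySem.Dict.empty := by
  rw [altOuter_spec]
  unfold idxB
  rw [List.map_flatMap, List.foldl_flatMap]
  apply PySem.List.foldl_congr_mem
  intro inner j _
  rw [altInner_spec, List.map_map]
  rfl

theorem mem_idxA (L : Int) (q : Nat × Nat) :
    q ∈ idxA L ↔ q.1 ≤ (max L 1000).toNat ∧ q.2 ≤ q.1 / 2 ∧ vOf q ≤ L := by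
  unfold idxA
  rw [List.mem_flatMap]
  constructor
  · rintro ⟨m, hm, hq⟩
    rw [List.mem_map] at hq
    obtain ⟨k, hk, rfl⟩ := hq
    rw [List.mem_filter, List.mem_range] at hk
    rw [List.mem_range] at hm
    exact ⟨by omega, by omega, of_decide_eq_true hk.2⟩
  · rintro ⟨h1, h2, h3⟩
    refine ⟨q.1, List.mem_range.2 (by omega), List.mem_map.2 ⟨q.2, ?_, rfl⟩⟩
    exact List.mem_filter.2 ⟨List.mem_range.2 (by omega), decide_eq_true h3⟩

theorem mem_idxB (L : Int) (hL : 1 ≤ L) (q : Nat × Nat) :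
    q ∈ idxB L ↔ 2 ≤ q.2 ∧ 2 * q.2 ≤ q.1 ∧ vOf q ≤ L := by
  unfold idxB
  rw [List.mem_flatMap]
  constructor
  · rintro ⟨j, hj, hq⟩
    rw [List.mem_map] at hq
    obtain ⟨n, hn, rfl⟩ := hq
    rw [List.mem_filter, List.mem_range'_1] at hn
    rw [List.mem_filter, List.mem_range'_1] at hj
    exact ⟨hj.1.1, hn.1.1, of_decide_eq_true hn.2⟩
  · rintro ⟨h1, h2, h3⟩
    have hval : (q.1 : Int) ≤ L := by
      have := pvLeChoose q.1 q.2 h1 h2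
      have hv : (q.1 : Int) ≤ vOf q := by simpa [vOf] using Nat.cast_le.2 this
      omega
    have hLN : ((L - 1).toNat : Int) = L - 1 := Int.toNat_of_nonneg (by omega)
    refine ⟨q.2, List.mem_filter.2 ⟨List.mem_range'_1.2 ⟨h1, ?_⟩, decide_eq_true ?_⟩,
      List.mem_map.2 ⟨q.1, List.mem_filter.2 ⟨List.mem_range'_1.2 ⟨h2, ?_⟩, decide_eq_true h3⟩, rfl⟩⟩
    · -- q.2 < 2 + (L-1).toNat
      have : (q.2 : Int) ≤ (q.1 : Int) := by exact_mod_cast Nat.le_of_lt_succ (by omega)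
      omega
    · -- vOf (2 * q.2, q.2) ≤ L
      have hmono : (2 * q.2).choose q.2 ≤ q.1.choose q.2 := Nat.choose_le_choose q.2 h2
      have : vOf (2 * q.2, q.2) ≤ vOf q := by simpa [vOf] using Nat.cast_le.2 hmono
      omega
    · -- q.1 < 2 * q.2 + (L + 1 - 2 * q.2).toNat
      have h2j : (2 * q.2 : Int) ≤ (q.1 : Int) := by exact_mod_cast h2
      omega

theorem nodup_idxA (L : Int) : (idxA L).Nodup := by
  unfold idxA
  rw [List.nodup_flatMap]
  constructor
  · intro m _
    refine (List.nodup_range.filter _).map ?_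
    intro a b h
    exact (Prod.mk.injEq _ _ _ _ ▸ h).2
  · refine List.Pairwise.imp ?_ (List.pairwise_lt_range)
    intro a b hab
    intro q hqa hqb
    obtain ⟨k, _, rfl⟩ := List.mem_map.1 hqa
    obtain ⟨k', _, hk'⟩ := List.mem_map.1 hqb
    exact absurd (congrArg Prod.fst hk').symm (by simp; omega)

theorem nodup_idxB (L : Int) : (idxB L).Nodup := by
  unfold idxB
  rw [List.nodup_flatMap]
  constructor
  · intro j _
    refine ((List.nodup_range' 1).filter _).map ?_
    intro a b h
    exact (Prod.mk.injEq _ _ _ _ ▸ h).1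
  · refine List.Pairwise.imp ?_ ((List.pairwise_lt_range' (s := 2) (n := (L-1).toNat) 1).sublist
      List.filter_sublist)
    intro a b hab
    intro q hqa hqb
    obtain ⟨n, _, rfl⟩ := List.mem_map.1 hqa
    obtain ⟨n', _, hn'⟩ := List.mem_map.1 hqb
    exact absurd (congrArg Prod.snd hn').symm (by simp; omega)

theorem WS_append (l₁ l₂ : List (Nat × Nat)) (w : Nat × Nat → Int) (v : Int) :
    WS (l₁ ++ l₂) w v = WS l₁ w v + WS l₂ w v := by
  simp [WS]

theorem WS_perm {l₁ l₂ : List (Nat × Nat)} (h : l₁.Perm l₂) (w : Nat × Nat → Int) (v : Int) :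
    WS l₁ w v = WS l₂ w v :=
  (h.map _).sum_eq

theorem WS_congr {l : List (Nat × Nat)} {w w' : Nat × Nat → Int}
    (h : ∀ q ∈ l, w q = w' q) (v : Int) : WS l w v = WS l w' v := by
  unfold WS
  refine congrArg List.sum (List.map_congr_left ?_)
  intro q hq; by_cases hv : vOf q = v <;> simp [hv, h q hq]

theorem WS_zero {l : List (Nat × Nat)} {v : Int} (h : ∀ q ∈ l, vOf q ≠ v)
    (w : Nat × Nat → Int) : WS l w v = 0 := by
  unfold WS
  rw [List.map_congr_left (fun q hq => if_neg (h q hq))]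
  simp

theorem WS_exists_of_ne_zero {l : List (Nat × Nat)} {w : Nat × Nat → Int} {v : Int}
    (h : WS l w v ≠ 0) : ∃ q ∈ l, vOf q = v := by
  by_contra hc
  push Not at hc
  exact h (WS_zero hc w)

theorem sum_pick (f : Nat → Int) (v : Int) :
    ∀ (c s : Nat), ((List.range' s c).map (fun m : Nat => if (m : Int) = v then f m else 0)).sum
      = if (s : Int) ≤ v ∧ v < (s : Int) + (c : Int) then f v.toNat else 0 := by
  intro c
  induction c with
  | zero =>
      intro s
      rw [if_neg (by omega)]
      simp
  | succ c ih =>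
      intro s
      rw [List.range'_succ, List.map_cons, List.sum_cons, ih (s + 1)]
      by_cases hs : (s : Int) = v
      · rw [if_pos hs, if_neg (by push_cast; omega), if_pos (by push_cast; omega)]
        have hv : v.toNat = s := by omega
        rw [hv, add_zero]
      · rw [if_neg hs]
        by_cases h2 : (s : Int) + 1 ≤ v ∧ v < (s : Int) + 1 + (c : Int)
        · rw [if_pos (by push_cast; omega), if_pos (by push_cast; omega)]
          ring
        · rw [if_neg (by push_cast; omega), if_neg (by push_cast at h2 ⊢; omega)]
          ring

theorem WS_split (L : Int) (v : Int) :
    WS (idxA L) wgtA v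
      = WS ((idxA L).filter (fun q => q.2 == 0)) wgtA v
        + WS ((idxA L).filter (fun q => q.2 == 1)) wgtA v
        + WS ((idxA L).filter (fun q => decide (2 ≤ q.2))) wgtA v := by
  have h1 := List.filter_append_perm (fun q : Nat × Nat => q.2 == 0) (idxA L)
  have h2 := List.filter_append_perm (fun q : Nat × Nat => q.2 == 1)
    ((idxA L).filter (fun q => !(q.2 == 0)))
  rw [← WS_perm h1 wgtA v, WS_append, ← WS_perm h2 wgtA v, WS_append]
  have e1 : ((idxA L).filter (fun q => !(q.2 == 0))).filter (fun q => q.2 == 1)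
      = (idxA L).filter (fun q => q.2 == 1) := by
    rw [List.filter_filter]
    apply List.filter_congr
    rintro ⟨a, b⟩ _
    rcases b with _ | _ | n <;> rfl
  have e2 : ((idxA L).filter (fun q => !(q.2 == 0))).filter (fun q => !(q.2 == 1))
      = (idxA L).filter (fun q => decide (2 ≤ q.2)) := by
    rw [List.filter_filter]
    apply List.filter_congr
    rintro ⟨a, b⟩ _
    rcases b with _ | _ | n <;> rfl
  rw [e1, e2]
  ring

theorem WS_P0 (L : Int) (hL : 1 ≤ L) (v : Int) :
    WS ((idxA L).filter (fun q => q.2 == 0)) wgtA v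
      = if v = 1 then (((max L 1000).toNat + 1 : Nat) : Int) else 0 := by
  have hinj : Function.Injective (fun m : Nat => (m, 0)) := by
    intro a b h; exact (Prod.mk.injEq _ _ _ _ ▸ h).1
  have hperm : ((idxA L).filter (fun q => q.2 == 0)).Perm
      ((List.range ((max L 1000).toNat + 1)).map (fun m => (m, 0))) := by
    refine (List.perm_ext_iff_of_nodup ((nodup_idxA L).filter _) (List.nodup_range.map hinj)).2 ?_
    intro q
    rw [List.mem_filter, mem_idxA, List.mem_map]
    constructor
    · rintro ⟨⟨hm, _, _⟩, hq0⟩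
      exact ⟨q.1, List.mem_range.2 (by omega), by
        have : q.2 = 0 := by simpa using hq0
        exact Prod.ext rfl this.symm⟩
    · rintro ⟨m, hm, rfl⟩
      rw [List.mem_range] at hm
      refine ⟨⟨by omega, by omega, ?_⟩, by simp⟩
      simp [vOf, Nat.choose_zero_right]
      omega
  rw [WS_perm hperm, WS, List.map_map]
  have hfun : ∀ m ∈ List.range ((max L 1000).toNat + 1),
      ((fun q => if vOf q = v then wgtA q else 0) ∘ (fun m : Nat => (m, 0))) m
        = (if v = 1 then (1 : Int) else 0) := by
    intro m _
    by_cases hv : v = 1 <;>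
      simp [vOf, wgtA, Nat.choose_zero_right, hv] <;> omega
  rw [List.map_congr_left hfun, PySem.List.sum_map_const_int]
  by_cases hv : v = 1 <;> simp [hv]

theorem WS_P1 (L : Int) (hL : 1 ≤ L) (v : Int) :
    WS ((idxA L).filter (fun q => q.2 == 1)) wgtA v
      = if 2 ≤ v ∧ v ≤ L then (if v = 2 then 1 else 2) else 0 := by
  have hinj : Function.Injective (fun m : Nat => (m, 1)) := by
    intro a b h; exact (Prod.mk.injEq _ _ _ _ ▸ h).1
  have hMN : ((max L 1000).toNat : Int) = max L 1000 :=
    Int.toNat_of_nonneg (le_trans (by norm_num) (le_max_right L 1000))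
  have hLN : (L.toNat : Int) = L := Int.toNat_of_nonneg (by omega)
  have hperm : ((idxA L).filter (fun q => q.2 == 1)).Perm
      ((List.range' 2 (L.toNat - 1)).map (fun m => (m, 1))) := by
    refine (List.perm_ext_iff_of_nodup ((nodup_idxA L).filter _)
      ((List.nodup_range' 1).map hinj)).2 ?_
    intro q
    rw [List.mem_filter, mem_idxA, List.mem_map]
    constructor
    · rintro ⟨⟨hm, hk, hv⟩, hq1⟩
      have h1 : q.2 = 1 := by simpa using hq1
      have hvq : vOf q = (q.1 : Int) := by simp [vOf, h1, Nat.choose_one_right]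
      refine ⟨q.1, List.mem_range'_1.2 ⟨by omega, by omega⟩, Prod.ext rfl h1.symm⟩
    · rintro ⟨m, hm, rfl⟩
      rw [List.mem_range'_1] at hm
      have hvq : vOf ((m, 1) : Nat × Nat) = (m : Int) := by simp [vOf, Nat.choose_one_right]
      refine ⟨⟨by omega, by omega, by omega⟩, by simp⟩
  rw [WS_perm hperm, WS, List.map_map]
  have hfun : ∀ m ∈ List.range' 2 (L.toNat - 1),
      ((fun q => if vOf q = v then wgtA q else 0) ∘ (fun m : Nat => (m, 1))) m
        = (fun m : Nat => if (m : Int) = v then (if m = 2 then (1:Int) else 2) else 0) m := by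
    intro m _
    simp only [Function.comp_apply, vOf, wgtA, Nat.choose_one_right]
    have : ((1:Nat) = 0 ∨ 2 * 1 = m) ↔ m = 2 := by omega
    by_cases hm2 : m = 2 <;> by_cases hmv : (m : Int) = v <;> simp [hm2, hmv] <;> omega
  rw [List.map_congr_left hfun, sum_pick]
  by_cases hc : 2 ≤ v ∧ v ≤ L
  · rw [if_pos (by omega), if_pos hc]
    by_cases hv2 : v = 2
    · rw [if_pos (by omega), if_pos hv2]
    · rw [if_neg (by omega), if_neg hv2]
  · rw [if_neg (by omega), if_neg hc]

theorem WS_P2 (L : Int) (hL : 1 ≤ L) (v : Int) :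
    WS ((idxA L).filter (fun q => decide (2 ≤ q.2))) wgtA v = WS (idxB L) wgtB v := by
  have hMN : ((max L 1000).toNat : Int) = max L 1000 :=
    Int.toNat_of_nonneg (le_trans (by norm_num) (le_max_right L 1000))
  have hperm : ((idxA L).filter (fun q => decide (2 ≤ q.2))).Perm (idxB L) := by
    refine (List.perm_ext_iff_of_nodup ((nodup_idxA L).filter _) (nodup_idxB L)).2 ?_
    intro q
    rw [List.mem_filter, mem_idxA, mem_idxB L hL]
    constructor
    · rintro ⟨⟨hm, hk, hv⟩, h2⟩
      exact ⟨by simpa using h2, by omega, hv⟩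
    · rintro ⟨h2, hk, hv⟩
      have hq1 : (q.1 : Int) ≤ L := by
        have := pvLeChoose q.1 q.2 h2 hk
        have : (q.1 : Int) ≤ vOf q := by simpa [vOf] using Nat.cast_le.2 this
        omega
      exact ⟨⟨by omega, by omega, hv⟩, by simpa using h2⟩
  rw [WS_perm hperm]
  refine WS_congr ?_ v
  intro q hq
  rw [mem_idxB L hL] at hq
  simp only [wgtA, wgtB]
  have : ¬ (q.2 = 0) := by omega
  by_cases h : q.1 = 2 * q.2 <;> simp [this, h] <;> omega

theorem getD_fold_ins (l : List (Int × Int)) (d : PySem.Dict Int Int) (v : Int) :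
    (l.foldl (fun d p => d.insert p.1 (d.getD p.1 0 + p.2)) d).getD v 0
      = d.getD v 0 + ((l.filter (fun p => p.1 == v)).map Prod.snd).sum := by
  induction l generalizing d with
  | nil => simp
  | cons p l ih =>
      rw [List.foldl_cons, ih, List.filter_cons]
      by_cases hv : p.1 = v
      · rw [if_pos (by simp [hv]), List.map_cons, List.sum_cons,
          PySem.Dict.getD_insert, if_pos hv.symm, hv]
        ring
      · rw [if_neg (by simp [hv]), PySem.Dict.getD_insert,
          if_neg (fun h => hv h.symm)]

theorem getD_fold_mod (l : List (Int × Int)) (d : PySem.Dict Int Int) (v : Int) :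
    (l.foldl (fun d p => d.modify p.1 0 (· + p.2)) d).getD v 0
      = d.getD v 0 + ((l.filter (fun p => p.1 == v)).map Prod.snd).sum := by
  induction l generalizing d with
  | nil => simp
  | cons p l ih =>
      rw [List.foldl_cons, ih, List.filter_cons]
      by_cases hv : p.1 = v
      · rw [if_pos (by simp [hv]), List.map_cons, List.sum_cons,
          PySem.Dict.getD_modify, if_pos hv.symm, hv]
        ring
      · rw [if_neg (by simp [hv]), PySem.Dict.getD_modify,
          if_neg (fun h => hv h.symm)]

theorem filterSum_pairify (l : List (Nat × Nat)) (w : Nat × Nat → Int) (v : Int) :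
    (((l.map (fun q => (vOf q, w q))).filter (fun p => p.1 == v)).map Prod.snd).sum
      = WS l w v := by
  induction l with
  | nil => simp [WS]
  | cons q l ih =>
      rw [List.map_cons, List.filter_cons]
      by_cases hv : vOf q = v
      · rw [if_pos (by simp [hv]), List.map_cons, List.sum_cons, ih]
        show w q + WS l w v = WS (q :: l) w v
        simp only [WS, List.map_cons, List.sum_cons, if_pos hv]
      · rw [if_neg (by simp [hv]), ih]
        show WS l w v = WS (q :: l) w v
        simp only [WS, List.map_cons, List.sum_cons, if_neg hv, zero_add]


theorem keys_fold_ins (l : List (Int × Int)) :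
    (l.foldl (fun d p => d.insert p.1 (d.getD p.1 0 + p.2)) PySem.Dict.empty).keys
      = PySem.Set.ofList (l.map Prod.fst) := by
  have h := PySem.Dict.keys_foldl_insert_key (ν := Int) l Prod.fst
    (fun d p => d.getD p.1 0 + p.2) PySem.Dict.empty
  rw [PySem.Dict.keys_empty, PySem.Set.update_nil_left] at h
  exact h

theorem keys_fold_mod (l : List (Int × Int)) :
    (l.foldl (fun d p => d.modify p.1 0 (· + p.2)) PySem.Dict.empty).keys
      = PySem.Set.ofList (l.map Prod.fst) := by
  have h := PySem.Dict.keys_foldl_modify_key (ν := Int) l Prod.fst 0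
    (fun _ p => (· + p.2)) PySem.Dict.empty
  rw [PySem.Dict.keys_empty, PySem.Set.update_nil_left] at h
  exact h

theorem nodup_keys_fold_ins (l : List (Int × Int)) :
    (l.foldl (fun d p => d.insert p.1 (d.getD p.1 0 + p.2)) PySem.Dict.empty).keys.Nodup :=
  PySem.Dict.nodup_keys_foldl_insert_key l Prod.fst _ _
    (by rw [PySem.Dict.keys_empty]; exact List.nodup_nil)

theorem nodup_keys_fold_mod (l : List (Int × Int)) :
    (l.foldl (fun d p => d.modify p.1 0 (· + p.2)) PySem.Dict.empty).keys.Nodup :=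
  PySem.Dict.nodup_keys_foldl_modify_key l Prod.fst 0 _ _
    (by rw [PySem.Dict.keys_empty]; exact List.nodup_nil)

theorem getD_pairs_ins (idx : List (Nat × Nat)) (w : Nat × Nat → Int) (v : Int) :
    ((idx.map (fun q => (vOf q, w q))).foldl
        (fun d p => d.insert p.1 (d.getD p.1 0 + p.2)) PySem.Dict.empty).getD v 0
      = WS idx w v := by
  rw [getD_fold_ins, PySem.Dict.getD_empty, filterSum_pairify, zero_add]

theorem getD_pairs_mod (idx : List (Nat × Nat)) (w : Nat × Nat → Int) (v : Int) :
    ((idx.map (fun q => (vOf q, w q))).foldl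
        (fun d p => d.modify p.1 0 (· + p.2)) PySem.Dict.empty).getD v 0
      = WS idx w v := by
  rw [getD_fold_mod, PySem.Dict.getD_empty, filterSum_pairify, zero_add]

theorem pv_main (limit : Int) : compute_A003015 limit = compute_A003015_alt limit := by
  by_cases hneg : limit < 1
  · simp only [compute_A003015, compute_A003015_alt, if_pos hneg]
    rw [countsA_eq]
    have hidx : idxA limit = [] := by
      unfold idxA
      rw [List.flatMap_eq_nil_iff]
      intro m _
      rw [List.map_eq_nil_iff, List.filter_eq_nil_iff]
      intro k hk
      rw [List.mem_range] at hk
      have hpos : 0 < m.choose k := Nat.choose_pos (by omega)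
      simp [vOf]
      omega
    rw [hidx]
    rfl
  · have hL : (1 : Int) ≤ limit := by omega
    simp only [compute_A003015, compute_A003015_alt, if_neg hneg]
    rw [countsA_eq, innerB_eq]
    set pA := (idxA limit).map (fun q => (vOf q, wgtA q)) with hpA
    set pB := (idxB limit).map (fun q => (vOf q, wgtB q)) with hpB
    set dA := pA.foldl (fun d p => d.insert p.1 (d.getD p.1 0 + p.2)) PySem.Dict.empty with hdA
    set dB := pB.foldl (fun d p => d.modify p.1 0 (· + p.2)) PySem.Dict.empty with hdB
    have hkAn : dA.keys.Nodup := nodup_keys_fold_ins pA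
    have hkBn : dB.keys.Nodup := nodup_keys_fold_mod pB
    have hgA : ∀ v, dA.getD v 0 = WS (idxA limit) wgtA v := fun v => getD_pairs_ins _ _ v
    have hgB : ∀ v, dB.getD v 0 = WS (idxB limit) wgtB v := fun v => getD_pairs_mod _ _ v
    have hmemA : ∀ v : Int, v ∈ dA.keys ↔ ∃ q ∈ idxA limit, vOf q = v := by
      intro v
      rw [hdA, keys_fold_ins, PySem.Set.mem_ofList, hpA, List.map_map, List.mem_map]
      simp [Function.comp]
    have hmemB : ∀ v : Int, v ∈ dB.keys ↔ ∃ q ∈ idxB limit, vOf q = v := by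
      intro v
      rw [hdB, keys_fold_mod, PySem.Set.mem_ofList, hpB, List.map_map, List.mem_map]
      simp [Function.comp]
    have hLa : (dA.items.filter (fun p => decide (5 ≤ p.2 ∧ 0 < p.1))).map Prod.fst
        = dA.keys.filter (fun v => decide (5 ≤ dA.getD v 0 ∧ 0 < v)) := by
      rw [PySem.Dict.items_eq_map_keys dA hkAn 0, List.filter_map, List.map_map]
      simp [Function.comp_def]
    have hLb : (dB.items.filter (fun p => decide ((3 : Int) ≤ p.2))).map Prod.fst
        = dB.keys.filter (fun v => decide ((3 : Int) ≤ dB.getD v 0)) := by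
      rw [PySem.Dict.items_eq_map_keys dB hkBn 0, List.filter_map, List.map_map]
      simp [Function.comp_def]
    rw [hLa, hLb]
    -- arithmetic facts about the two counts
    have hcnt : ∀ v, WS (idxA limit) wgtA v
        = (if v = 1 then (((max limit 1000).toNat + 1 : Nat) : Int) else 0)
          + (if 2 ≤ v ∧ v ≤ limit then (if v = 2 then 1 else 2) else 0)
          + WS (idxB limit) wgtB v := by
      intro v
      rw [WS_split, WS_P0 limit hL, WS_P1 limit hL, WS_P2 limit hL]
    have hBpos : ∀ v, 0 ≤ WS (idxB limit) wgtB v := by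
      intro v
      refine WS_nonneg ?_ v
      intro q
      unfold wgtB
      split <;> norm_num
    have hB6 : ∀ v, WS (idxB limit) wgtB v ≠ 0 → 6 ≤ v ∧ v ≤ limit := by
      intro v h
      obtain ⟨q, hq, rfl⟩ := WS_exists_of_ne_zero h
      rw [mem_idxB limit hL] at hq
      have h6 := pvSixLeChoose q.1 q.2 hq.1 hq.2.1
      exact ⟨by exact_mod_cast Nat.cast_le.2 h6, hq.2.2⟩
    have hmx : (1000 : Int) ≤ max limit 1000 := le_max_right _ _
    -- membership in the two result lists, in closed form
    have hA : ∀ v : Int, v ∈ dA.keys.filter (fun v => decide (5 ≤ dA.getD v 0 ∧ 0 < v))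
        ↔ 5 ≤ WS (idxA limit) wgtA v ∧ 0 < v := by
      intro v
      rw [List.mem_filter, decide_eq_true_eq, hgA]
      constructor
      · exact fun h => h.2
      · intro h
        have hne : WS (idxA limit) wgtA v ≠ 0 := by omega
        exact ⟨(hmemA v).2 (WS_exists_of_ne_zero hne), h⟩
    have hB : ∀ v : Int, v ∈ dB.keys.filter (fun v => decide ((3 : Int) ≤ dB.getD v 0))
        ↔ 3 ≤ WS (idxB limit) wgtB v := by
      intro v
      rw [List.mem_filter, decide_eq_true_eq, hgB]
      constructor
      · exact fun h => h.2
      · intro h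
        have hne : WS (idxB limit) wgtB v ≠ 0 := by omega
        exact ⟨(hmemB v).2 (WS_exists_of_ne_zero hne), h⟩
    -- the two filtered key lists are permutations of each other
    have hone : (1 : Int) ∉ dB.keys.filter (fun v => decide ((3 : Int) ≤ dB.getD v 0)) := by
      intro hmem
      have h3 := (hB 1).1 hmem
      have := hB6 1 (by omega)
      omega
    refine (PySem.List.sorted_id_eq_sorted_id_iff_perm _ _).2 ?_
    refine (List.perm_ext_iff_of_nodup (hkAn.filter _) (List.nodup_cons.2 ⟨hone, hkBn.filter _⟩)).2 ?_
    intro v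
    rw [hA, List.mem_cons, hB, hcnt v]
    rcases eq_or_ne (WS (idxB limit) wgtB v) 0 with hb | hb
    · rw [hb]
      have hBp := hBpos v
      split_ifs <;> omega
    · obtain ⟨h6, hle⟩ := hB6 v hb
      have hBp := hBpos v
      split_ifs <;> omega

-- ===== VERDICT (by name: the statement is the Claim_ definition above) =====
theorem compute_A003015_spec : Claim_equal_compute_A003015 := by
  intro limit _
  unfold Spec_compute_A003015
  exact pv_main limit
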